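-- pv_equiv track=rewrite | github.com/cryanwashere/Search_Engine_Backend | search_engine/wikipedia_title_crawl.py | split_durations
-- ===== SOURCE A (Python) =====
-- def split_durations(durations, max_duration=500):
--     """
--     Splits durations larger than max_duration into chunks of size max_duration or less.
--
--     Args:
--         durations: A list of tuples representing durations.
--         max_duration: The maximum allowed duration for a single chunk.
--
--     Returns:
--         A list of tuples representing split durations.
--     """
--     split_durations = []
--     for start, end in durations:
--         if end - start > max_duration:
--             current_start = start
--             while current_start < end:
--                 next_end = min(current_start + max_duration, end)
--                 split_durations.append((current_start, next_end))
--                 current_start = next_end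
--         else:
--             split_durations.append((start, end))
--
--     split_durations = list(filter(lambda x : x[1] - x[0] > 1 , split_durations))
--     return split_durations
-- ===== SOURCE B (Python) =====
-- def split_durations(durations, max_duration=500):
--     result = []
--     for start, end in durations:
--         width = end - start
--         if width <= 1:
--             continue
--         n = -(-width // max_duration)          # number of chunks (ceiling division)
--         last_start = start + (n - 1) * max_duration
--         if max_duration > 1:                   # interior chunks have width max_duration
--             result.extend((start + i * max_duration, start + (i + 1) * max_duration)
--                           for i in range(n - 1))
--         if end - last_start > 1:               # the final (possibly short) chunk
--             result.append((last_start, end))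
--     return result
-- ===== Notes on version B (the rewrite author's own statement) =====
-- stated objective: alternative
-- what changed: Replaces A's step-by-step while loop plus trailing filter with closed-form arithmetic: ceiling division computes the chunk count, interior chunks are generated by index over range, and the short final chunk and the width<=1 filter are resolved arithmetically per interval.
import Mathlib
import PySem

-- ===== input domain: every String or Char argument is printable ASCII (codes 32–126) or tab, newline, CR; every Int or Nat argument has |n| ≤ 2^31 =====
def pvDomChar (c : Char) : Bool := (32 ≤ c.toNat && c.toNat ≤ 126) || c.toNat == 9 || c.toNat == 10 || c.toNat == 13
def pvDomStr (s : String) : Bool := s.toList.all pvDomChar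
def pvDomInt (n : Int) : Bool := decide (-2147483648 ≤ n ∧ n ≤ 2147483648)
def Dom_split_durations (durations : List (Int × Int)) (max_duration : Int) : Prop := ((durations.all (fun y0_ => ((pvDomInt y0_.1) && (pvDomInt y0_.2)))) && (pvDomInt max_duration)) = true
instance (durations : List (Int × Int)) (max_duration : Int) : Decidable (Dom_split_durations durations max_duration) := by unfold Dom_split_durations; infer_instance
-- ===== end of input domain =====

-- B replaces A's step-by-step while loop plus trailing filter by closed-form arithmetic
-- (ceiling division gives the chunk count, chunks are generated by index); return values agree (no speed claim).

-- ===== PORT A =====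
-- the inner 'while current_start < end' loop; fuel (end-start).toNat is enough: with
-- max_duration ≥ 1 (guaranteed by Pre_ whenever the loop is entered) each step advances ≥ 1
def pvChunkA (md e : Int) : Nat → Int → List (Int × Int)
  | 0, _ => []
  | fuel + 1, cur =>
      if cur < e then
        (cur, min (cur + md) e) :: pvChunkA md e fuel (min (cur + md) e)
      else []

def split_durations (durations : List (Int × Int)) (max_duration : Int) : List (Int × Int) :=
  (durations.foldl (fun acc se =>
      if se.2 - se.1 > max_duration then
        acc ++ pvChunkA max_duration se.2 (se.2 - se.1).toNat se.1
      else
        acc ++ [(se.1, se.2)]) []).filter (fun x => x.2 - x.1 > 1)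

-- ===== PORT B =====
-- the body of B's for-loop for one (start, stop) pair: chunk count by ceiling division,
-- interior chunks generated by index over range, the final short chunk kept iff width > 1
def pvIntervalB (start stop md : Int) : List (Int × Int) :=
  let width := stop - start
  if width ≤ 1 then []
  else
    let n : Int := -(PySem.Int.floordiv (-width) md)
    let lastStart := start + (n - 1) * md
    (if md > 1 then
        (PySem.List.pyRange 0 (n - 1) 1).map (fun i => (start + i * md, start + (i + 1) * md))
      else [])
    ++ (if stop - lastStart > 1 then [(lastStart, stop)] else [])

def split_durations_alt (durations : List (Int × Int)) (max_duration : Int) : List (Int × Int) :=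
  durations.foldl (fun acc se => acc ++ pvIntervalB se.1 se.2 max_duration) []

-- ===== PRECONDITION & SPEC =====
-- Pre_ excludes exactly the inputs on which Python A never returns: with max_duration ≤ 0
-- and some interval start < end the while loop never reaches end (infinite loop).
def Pre_split_durations (durations : List (Int × Int)) (max_duration : Int) : Prop :=
  ∀ p ∈ durations, p.1 < p.2 → 1 ≤ max_duration
instance (durations : List (Int × Int)) (max_duration : Int) : Decidable (Pre_split_durations durations max_duration) := by unfold Pre_split_durations; infer_instance

def pvWitness_split_durations : (List (Int × Int)) × Int := ([(0, 5), (10, 11), (7, 3)], 2)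

def Spec_split_durations (durations : List (Int × Int)) (max_duration : Int) (out : List (Int × Int)) : Prop := out = split_durations_alt durations max_duration
instance (durations : List (Int × Int)) (max_duration : Int) (out : List (Int × Int)) : Decidable (Spec_split_durations durations max_duration out) := by unfold Spec_split_durations; infer_instance

-- ===== CLAIM (what is proved, stated in full; the proofs are below) =====
def Claim_equal_split_durations : Prop := ∀ (durations : List (Int × Int)) (max_duration : Int), Dom_split_durations durations max_duration → Pre_split_durations durations max_duration → Spec_split_durations durations max_duration (split_durations durations max_duration)

-- ===== LEMMAS AND PROOFS =====

-- proof-side intermediate: A's loop with the width>1 filter fused in, chunk by chunk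
def pvChunkB (md e : Int) : Nat → Int → List (Int × Int)
  | 0, _ => []
  | fuel + 1, cur =>
      if cur < e then
        (if min (cur + md) e - cur > 1 then [(cur, min (cur + md) e)] else []) ++
          pvChunkB md e fuel (min (cur + md) e)
      else []

-- B's fused loop is exactly A's loop followed by the width>1 filter, chunk by chunk
theorem pvChunk_filter (md e : Int) : ∀ (fuel : Nat) (cur : Int),
    (pvChunkA md e fuel cur).filter (fun x => x.2 - x.1 > 1) = pvChunkB md e fuel cur := by
  intro fuel
  induction fuel with
  | zero => intro cur; simp [pvChunkA, pvChunkB]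
  | succ n ih =>
      intro cur
      by_cases h : cur < e
      · simp only [pvChunkA, pvChunkB, if_pos h, List.filter_cons]
        rw [ih]
        by_cases hw : min (cur + md) e - cur > 1 <;> simp [hw]
      · simp [pvChunkA, pvChunkB, if_neg h]

theorem pvChunkB_at_end (md e : Int) (fuel : Nat) : pvChunkB md e fuel e = [] := by
  cases fuel with
  | zero => rfl
  | succ n => simp [pvChunkB]

-- any fuel ≥ (e-cur).toNat computes the same list (each step advances by at least 1)
theorem pvChunkB_fuel (md e : Int) (hmd : 1 ≤ md) : ∀ (f1 f2 : Nat) (cur : Int),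
    (e - cur).toNat ≤ f1 → (e - cur).toNat ≤ f2 →
    pvChunkB md e f1 cur = pvChunkB md e f2 cur := by
  intro f1
  induction f1 with
  | zero =>
      intro f2 cur h1 h2
      have hce : ¬ cur < e := by omega
      cases f2 with
      | zero => rfl
      | succ m => simp [pvChunkB, if_neg hce]
  | succ n ih =>
      intro f2 cur h1 h2
      by_cases hce : cur < e
      · have hf2 : ∃ m, f2 = m + 1 := by
          cases f2 with
          | zero => omega
          | succ m => exact ⟨m, rfl⟩
        obtain ⟨m, rfl⟩ := hf2
        simp only [pvChunkB, if_pos hce]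
        have hrec : (e - min (cur + md) e).toNat ≤ n ∧ (e - min (cur + md) e).toNat ≤ m := by
          constructor <;> omega
        rw [ih m (min (cur + md) e) hrec.1 hrec.2]
      · cases f2 with
        | zero => simp [pvChunkB, if_neg hce]
        | succ m => simp [pvChunkB, if_neg hce]

-- ceiling-division bracket for n = -((-w) // md)
theorem pvCeil_bracket (w md : Int) (hmd : 1 ≤ md) :
    (-(PySem.Int.floordiv (-w) md) - 1) * md < w ∧ w ≤ -(PySem.Int.floordiv (-w) md) * md :=
  (PySem.Int.neg_floordiv_neg_eq_iff_of_pos (by omega)).mp rfl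

-- unfolded form of pvIntervalB, valid for width ≥ 1
theorem pvIntervalB_eq (start stop md : Int) (hmd : 1 ≤ md) (hw : 1 ≤ stop - start) :
    pvIntervalB start stop md =
      (if md > 1 then
          (PySem.List.pyRange 0 (-(PySem.Int.floordiv (-(stop - start)) md) - 1) 1).map
            (fun i => (start + i * md, start + (i + 1) * md))
        else [])
      ++ (if stop - (start + (-(PySem.Int.floordiv (-(stop - start)) md) - 1) * md) > 1 then
            [(start + (-(PySem.Int.floordiv (-(stop - start)) md) - 1) * md, stop)]
          else []) := by
  by_cases h1 : stop - start ≤ 1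
  · have hw1 : stop - start = 1 := by omega
    have hn : -(PySem.Int.floordiv (-(stop - start)) md) = 1 := by
      rw [PySem.Int.neg_floordiv_neg_eq_iff_of_pos (by omega)]
      constructor <;> nlinarith
    simp only [pvIntervalB, if_pos h1, hn]
    have : stop - (start + (1 - 1) * md) = 1 := by rw [hw1] at *; ring_nf; omega
    rw [this]
    simp [PySem.List.pyRange_one_eq_nil]
  · simp only [pvIntervalB, if_neg h1]

-- peel one chunk off the closed form, when the interval is strictly longer than md
theorem pvIntervalB_step (start stop md : Int) (hmd : 1 ≤ md) (hgt : stop - start > md) :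
    pvIntervalB start stop md =
      (if md > 1 then [(start, start + md)] else []) ++ pvIntervalB (start + md) stop md := by
  have hw : 1 ≤ stop - start := by omega
  have hw' : 1 ≤ stop - (start + md) := by omega
  obtain ⟨hb1, hb2⟩ := pvCeil_bracket (stop - start) md hmd
  obtain ⟨hb1', hb2'⟩ := pvCeil_bracket (stop - (start + md)) md hmd
  set n : Int := -(PySem.Int.floordiv (-(stop - start)) md) with hn
  set n' : Int := -(PySem.Int.floordiv (-(stop - (start + md))) md) with hn'
  have hn2 : 2 ≤ n := by nlinarith
  have hnn' : n' = n - 1 := by nlinarith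
  rw [pvIntervalB_eq start stop md hmd hw, pvIntervalB_eq (start + md) stop md hmd hw']
  rw [← hn, ← hn', hnn']
  by_cases hmd1 : md > 1
  · simp only [if_pos hmd1]
    have hcons : PySem.List.pyRange 0 (n - 1) 1 = 0 :: PySem.List.pyRange 1 (n - 1) 1 :=
      PySem.List.pyRange_one_cons (by omega)
    rw [hcons]
    simp only [List.map_cons, List.cons_append]
    have hlast : start + (n - 1) * md = (start + md) + (n - 1 - 1) * md := by ring
    have hshift :
        (PySem.List.pyRange 1 (n - 1) 1).map (fun i => (start + i * md, start + (i + 1) * md))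
          = (PySem.List.pyRange 0 (n - 1 - 1) 1).map
              (fun i => ((start + md) + i * md, (start + md) + (i + 1) * md)) := by
      rw [PySem.List.pyRange_one 1 (n - 1), PySem.List.pyRange_one 0 (n - 1 - 1)]
      rw [List.map_map, List.map_map]
      rw [show (n - 1 - (1:Int)).toNat = (n - 1 - 1 - 0).toNat by norm_num]
      apply List.map_congr_left
      intro k _
      simp only [Function.comp, Prod.mk.injEq]
      constructor <;> ring
    rw [hshift, hlast]
    simp
  · simp only [if_neg hmd1]
    have hmd1' : md = 1 := by omega
    subst hmd1'
    have hnval : n = stop - start := by nlinarith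
    have hnval' : n - 1 = stop - (start + 1) := by omega
    have c1 : ¬ stop - (start + (n - 1) * 1) > 1 := by omega
    have c2 : ¬ stop - ((start + 1) + (n - 1 - 1) * 1) > 1 := by omega
    simp only [if_neg c1, if_neg c2]
    simp

-- for md ≥ 1 the fuelled fused loop computes the closed form
theorem pvB_closed (md e : Int) (hmd : 1 ≤ md) : ∀ (w : Nat) (s : Int),
    w = (e - s).toNat → pvChunkB md e w s = pvIntervalB s e md := by
  intro w
  induction w using Nat.strong_induction_on with
  | _ w ih =>
    intro s hw
    by_cases hse : s < e
    · have hwpos : 1 ≤ w := by omega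
      obtain ⟨w', rfl⟩ : ∃ w'', w = w'' + 1 := ⟨w - 1, by omega⟩
      by_cases hble : e - s ≤ md
      · -- single chunk: min (s+md) e = e
        have hmin : min (s + md) e = e := by omega
        simp only [pvChunkB, if_pos hse, hmin, pvChunkB_at_end, List.append_nil]
        by_cases h1 : e - s ≤ 1
        · have : ¬ (e - s > 1) := by omega
          simp [pvIntervalB, h1, this]
        · rw [pvIntervalB_eq s e md hmd (by omega)]
          have hn : -(PySem.Int.floordiv (-(e - s)) md) = 1 := by
            rw [PySem.Int.neg_floordiv_neg_eq_iff_of_pos (by omega)]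
            constructor <;> nlinarith
          rw [hn]
          have hrange : PySem.List.pyRange 0 (1 - 1) 1 = [] :=
            PySem.List.pyRange_one_eq_nil (by norm_num)
          have hls : e - (s + (1 - 1) * md) = e - s := by ring_nf
          rw [hrange, hls]
          have h2 : e - s > 1 := by omega
          simp [h2]
      · -- peel one chunk of width md
        have hmin : min (s + md) e = s + md := by omega
        simp only [pvChunkB, if_pos hse, hmin]
        have hw' : (e - (s + md)).toNat < w' + 1 := by omega
        rw [pvChunkB_fuel md e hmd w' ((e - (s + md)).toNat) (s + md) (by omega) (by omega)]
        rw [ih ((e - (s + md)).toNat) hw' (s + md) rfl]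
        rw [pvIntervalB_step s e md hmd (by omega)]
        have : s + md - s = md := by ring
        rw [this]
    · -- s ≥ e: width ≤ 0, loop body never runs, closed form is []
      have hw0 : w = 0 := by omega
      subst hw0
      have h1 : e - s ≤ 1 := by omega
      simp [pvChunkB, pvIntervalB, h1]

-- per-interval agreement: filtering A's contribution for one (s,e) gives B's contribution
theorem pv_interval (md s e : Int) (hmd : s < e → 1 ≤ md) :
    (if e - s > md then pvChunkA md e (e - s).toNat s else [(s, e)]).filter
        (fun x => x.2 - x.1 > 1) = pvIntervalB s e md := by
  by_cases hse : s < e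
  · have hmd1 : 1 ≤ md := hmd hse
    by_cases hb : e - s > md
    · rw [if_pos hb, pvChunk_filter, pvB_closed md e hmd1 ((e - s).toNat) s rfl]
    · rw [if_neg hb, ← pvB_closed md e hmd1 ((e - s).toNat) s rfl]
      obtain ⟨w', hww⟩ : ∃ w'', (e - s).toNat = w'' + 1 := ⟨(e - s).toNat - 1, by omega⟩
      rw [hww]
      have hmin : min (s + md) e = e := by omega
      simp only [pvChunkB, if_pos hse, hmin, pvChunkB_at_end, List.append_nil]
      by_cases hw1 : e - s > 1 <;> simp [hw1]
  · have h1 : e - s ≤ 1 := by omega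
    have hb : ¬ (e - s > md) ∨ (e - s > md) := by tauto
    by_cases hbb : e - s > md
    · rw [if_pos hbb]
      have h0 : (e - s).toNat = 0 := by omega
      rw [h0]
      simp [pvChunkA, pvIntervalB, h1]
    · rw [if_neg hbb]
      have : ¬ (e - s > 1) := by omega
      simp [pvIntervalB, h1, this]

theorem pv_foldl_if_append {α β : Type} (p : α → Prop) [DecidablePred p]
    (f g : α → List β) :
    ∀ (l : List α) (acc : List β),
      List.foldl (fun acc se => if p se then acc ++ f se else acc ++ g se) acc l
        = acc ++ l.flatMap (fun se => if p se then f se else g se) := by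
  intro l
  induction l with
  | nil => intro acc; simp
  | cons x xs ih =>
      intro acc
      simp only [List.foldl_cons, List.flatMap_cons, ih]
      by_cases h : p x <;> simp [h]

theorem pv_flatMap_congr_mem {α β : Type} (f g : α → List β) :
    ∀ (l : List α), (∀ x ∈ l, f x = g x) → l.flatMap f = l.flatMap g := by
  intro l
  induction l with
  | nil => intro _; rfl
  | cons x xs ih =>
      intro h
      simp only [List.flatMap_cons, h x (by simp), ih (fun y hy => h y (by simp [hy]))]

-- ===== VERDICT (by name: the statement is the Claim_ definition above) =====
theorem split_durations_spec : Claim_equal_split_durations := by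
  intro durations max_duration _ hpre
  unfold Spec_split_durations split_durations split_durations_alt
  conv_rhs => rw [PySem.List.foldl_append_eq_flatMap]
  rw [pv_foldl_if_append (p := fun se : Int × Int => se.2 - se.1 > max_duration)
        (f := fun se => pvChunkA max_duration se.2 (se.2 - se.1).toNat se.1)
        (g := fun se => [(se.1, se.2)]),
      List.nil_append, List.nil_append, List.filter_flatMap]
  exact pv_flatMap_congr_mem _ _ durations
    (fun se hse => pv_interval max_duration se.1 se.2 (hpre se hse))
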